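-- pv_equiv track=rewrite | github.com/joshb019919/DroneElectricFlightPlanner | droneFlightPlaner.py | calc_drone_min_energy
-- ===== SOURCE A (Python) =====
-- def calc_drone_min_energy(route):
--   """ Calculate the minimum amount of energy required to keep
--   a drone afloat when increasing altitude costs kilowatt hours
--   of electricity and dropping altitude gains kilowatt hours.
--
--   --route A 3D array of location changes of x, y, and z directions.
--
--   Only the z location matters, as x and y movement does not
--   cost electricity.
--
--   Keeps track of the lowest point below zero that the drone
--   costs in kilowatt hours.  At minimum, the drone needs at
--   least that many KWh to say afloat and not crash when
--   raising altitude.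
--   """
--
--   total_energy = 0
--   prev_height = route[0][2]
--   min_req = 0
--
--   for coord in route[1:]:
--     curr_height = coord[2]
--     total_energy -= curr_height - prev_height
--     prev_height = coord[2]
--
--     if total_energy < 0 and total_energy < min_req:
--       min_req = total_energy
--
--   return -min_req
-- ===== SOURCE B (Python) =====
-- def calc_drone_min_energy(route):
--     h0 = route[0][2]
--     if len(route) <= 1:
--         return 0
--     return max(0, max(c[2] for c in route[1:]) - h0)
-- ===== Notes on version B (the rewrite author's own statement) =====
-- stated objective: simpler
-- what changed: Replaces A's loop maintaining a running energy total, previous height and running minimum with a direct closed form: the clamped peak height gain over the start, max(0, max(c[2] for c in route[1:]) - route[0][2]).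
import Mathlib
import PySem

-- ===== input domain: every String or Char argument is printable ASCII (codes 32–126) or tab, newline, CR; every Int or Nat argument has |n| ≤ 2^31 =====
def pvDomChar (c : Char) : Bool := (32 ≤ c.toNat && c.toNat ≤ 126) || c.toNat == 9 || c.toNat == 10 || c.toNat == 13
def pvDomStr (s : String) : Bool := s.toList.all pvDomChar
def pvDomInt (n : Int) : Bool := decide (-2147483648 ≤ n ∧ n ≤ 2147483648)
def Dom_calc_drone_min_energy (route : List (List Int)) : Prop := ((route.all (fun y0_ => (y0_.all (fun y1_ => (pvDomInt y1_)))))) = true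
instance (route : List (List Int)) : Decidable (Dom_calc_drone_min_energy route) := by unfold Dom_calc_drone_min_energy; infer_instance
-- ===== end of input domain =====

-- B replaces A's running energy total / previous height / running minimum loop
-- by the closed form max(0, peak altitude after the start - starting altitude) (objective: simpler).


-- ===== PORT A =====
def calc_drone_min_energy (route : List (List Int)) : Int :=
  -- total_energy = 0; prev_height = route[0][2]; min_req = 0
  let prev_height : Int := PySem.List.pyGetD (PySem.List.pyGetD route 0 []) 2 0;
  -- for coord in route[1:]: …   (state = (total_energy, prev_height, min_req))
  (-((PySem.List.slice route (some 1) none).foldl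
    (fun (st : Int × Int × Int) coord =>
      let curr_height := PySem.List.pyGetD coord 2 0
      let total_energy := st.1 - (curr_height - st.2.1)
      let min_req := if total_energy < 0 ∧ total_energy < st.2.2 then total_energy else st.2.2
      (total_energy, curr_height, min_req))
    (0, prev_height, 0)).2.2)

-- ===== PORT B =====
def calc_drone_min_energy_alt (route : List (List Int)) : Int :=
  let h0 : Int := PySem.List.pyGetD (PySem.List.pyGetD route 0 []) 2 0
  if PySem.List.len route ≤ 1 then 0
  else
    match PySem.List.max? ((PySem.List.slice route (some 1) none).map
        (fun c => PySem.List.pyGetD c 2 0)) (fun y => y) with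
    | some m => max 0 (m - h0)
    | none => 0   -- unreachable: len route > 1

-- ===== PRECONDITION & SPEC =====
-- Pre_ excludes exactly the inputs where Python A raises IndexError: empty route, or a coordinate shorter than 3.
def Pre_calc_drone_min_energy (route : List (List Int)) : Prop :=
  route ≠ [] ∧ ∀ c ∈ route, 3 ≤ c.length
instance (route : List (List Int)) : Decidable (Pre_calc_drone_min_energy route) := by
  unfold Pre_calc_drone_min_energy; infer_instance
def pvWitness_calc_drone_min_energy : List (List Int) := [[0, 0, 5], [1, 1, 7]]

def Spec_calc_drone_min_energy (route : List (List Int)) (out : Int) : Prop := out = calc_drone_min_energy_alt route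
instance (route : List (List Int)) (out : Int) : Decidable (Spec_calc_drone_min_energy route out) := by unfold Spec_calc_drone_min_energy; infer_instance

-- ===== CLAIM (what is proved, stated in full; the proofs are below) =====
def Claim_equal_calc_drone_min_energy : Prop := ∀ (route : List (List Int)), Dom_calc_drone_min_energy route → Pre_calc_drone_min_energy route → Spec_calc_drone_min_energy route (calc_drone_min_energy route)

-- ===== LEMMAS AND PROOFS =====

-- A's loop step on state (total_energy, prev_height, min_req)
def pvStepA (st : Int × Int × Int) (coord : List Int) : Int × Int × Int :=
  let curr_height := PySem.List.pyGetD coord 2 0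
  let total_energy := st.1 - (curr_height - st.2.1)
  let min_req := if total_energy < 0 ∧ total_energy < st.2.2 then total_energy else st.2.2
  (total_energy, curr_height, min_req)

-- the total telescopes: after each coord the tracked minimum is a plain running min of t + p - height
lemma foldA_min (l : List (List Int)) (t p m : Int) (hm : m ≤ 0) :
    (l.foldl pvStepA (t, p, m)).2.2
      = (l.map (fun c => t + p - PySem.List.pyGetD c 2 0)).foldl min m := by
  induction l generalizing t p m with
  | nil => rfl
  | cons c cs ih =>
    simp only [List.foldl_cons, List.map_cons]
    have hstep : pvStepA (t, p, m) c
        = (t + p - PySem.List.pyGetD c 2 0, PySem.List.pyGetD c 2 0,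
           min m (t + p - PySem.List.pyGetD c 2 0)) := by
      simp only [pvStepA]
      refine Prod.ext (by ring) (Prod.ext rfl ?_)
      simp only
      split_ifs with h <;> omega
    rw [hstep, ih _ _ _ (by omega)]
    congr 1
    apply List.map_congr_left; intro x _; ring

lemma foldl_min_sub (hs : List Int) (a M : Int) :
    (hs.map (fun h => a - h)).foldl min (a - M) = a - hs.foldl max M := by
  induction hs generalizing M with
  | nil => rfl
  | cons h t ih =>
    simp only [List.map_cons, List.foldl_cons]
    rw [show min (a - M) (a - h) = a - max M h by omega, ih]

lemma foldl_max_max (l : List Int) (a b : Int) :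
    l.foldl max (max a b) = max a (l.foldl max b) := by
  induction l generalizing b with
  | nil => rfl
  | cons h t ih =>
    simp only [List.foldl_cons, max_assoc]
    exact ih (max b h)

-- ===== VERDICT (by name: the statement is the Claim_ definition above) =====
theorem calc_drone_min_energy_spec : Claim_equal_calc_drone_min_energy := by
  intro route _ hpre
  obtain ⟨hne, _⟩ := hpre
  obtain ⟨r0, rest, rfl⟩ := List.exists_cons_of_ne_nil hne
  show calc_drone_min_energy (r0 :: rest) = calc_drone_min_energy_alt (r0 :: rest)
  simp only [calc_drone_min_energy, calc_drone_min_energy_alt,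
    PySem.List.slice_from_one, List.tail_cons, PySem.List.len_eq]
  set a : Int := PySem.List.pyGetD (PySem.List.pyGetD (r0 :: rest) 0 []) 2 0 with ha
  have hfold : (rest.foldl pvStepA (0, a, 0)).2.2
      = (rest.map (fun c => a - PySem.List.pyGetD c 2 0)).foldl min 0 := by
    rw [foldA_min rest 0 a 0 le_rfl]
    congr 1
    apply List.map_congr_left; intro x _; ring
  show -(List.foldl pvStepA (0, a, 0) rest).2.2 = _
  rw [hfold]
  match rest with
  | [] => simp
  | c :: cs =>
    have hlen : ¬ ((List.length (r0 :: c :: cs) : Int) ≤ 1) := by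
      simp [List.length_cons]
    rw [if_neg hlen]
    simp only [List.map_cons, PySem.List.max?_id_cons, List.foldl_cons]
    rw [show (cs.map (fun c => a - PySem.List.pyGetD c 2 0))
        = (cs.map (fun c => PySem.List.pyGetD c 2 0)).map (fun x => a - x) from by
      simp [List.map_map, Function.comp]]
    rw [show min 0 (a - PySem.List.pyGetD c 2 0)
        = a - max a (PySem.List.pyGetD c 2 0) by omega]
    rw [foldl_min_sub, foldl_max_max]
    set P := (cs.map (fun c => PySem.List.pyGetD c 2 0)).foldl max (PySem.List.pyGetD c 2 0)
    omega
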